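-- pv_equiv track=rewrite | github.com/pypi-data/pypi-mirror-403 | packages/logsage/logsage-0.1.5-py3-none-any.whl/logsage/auto_resume_policy/error_extraction.py | get_texts_for_first_unique_cluster
-- ===== SOURCE A (Python) =====
-- def get_texts_for_first_unique_cluster(texts: list | None = None, cluster_ids: list | None = None) -> list:
--     """Helper function to return the first lines for clustering
--
--     Args:
--         texts: Log lines
--         cluster_ids: Cluster_ids
--
--     Returns:
--         list of lines by clusters ids
--     """
--     if texts is None:
--         texts = []
--     if cluster_ids is None:
--         cluster_ids = []
--
--     unique_cluster_ids = set()
--     result_texts = []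
--     cluster_to_text = {}
--
--     for text, cluster_id in zip(texts, cluster_ids):
--         if cluster_id not in cluster_to_text:
--             cluster_to_text[cluster_id] = text
--         if cluster_id not in unique_cluster_ids:
--             unique_cluster_ids.add(cluster_id)
--             result_texts.append(text)
--
--     return result_texts
-- ===== SOURCE B (Python) =====
-- def get_texts_for_first_unique_cluster(texts: list | None = None, cluster_ids: list | None = None) -> list:
--     """Return the first text per distinct cluster id, in first-appearance order.
--
--     Algorithm: a take-and-filter (nub) loop -- peel the first remaining pair,
--     emit its text, and drop every later pair with the same cluster id from the
--     worklist. No set/dict membership state is kept at all.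
--     """
--     pairs = list(zip(texts or [], cluster_ids or []))
--     result = []
--     while pairs:
--         text, cid = pairs[0]
--         result.append(text)
--         pairs = [p for p in pairs[1:] if p[1] != cid]
--     return result
-- ===== Notes on version B (the rewrite author's own statement) =====
-- stated objective: alternative
-- what changed: Replaces A's single pass with set/dict membership state by a stateless take-and-filter (nub) loop: emit the head pair's text, then filter every later pair with the same cluster id out of the worklist; no set, dict or membership test survives.
import Mathlib
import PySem

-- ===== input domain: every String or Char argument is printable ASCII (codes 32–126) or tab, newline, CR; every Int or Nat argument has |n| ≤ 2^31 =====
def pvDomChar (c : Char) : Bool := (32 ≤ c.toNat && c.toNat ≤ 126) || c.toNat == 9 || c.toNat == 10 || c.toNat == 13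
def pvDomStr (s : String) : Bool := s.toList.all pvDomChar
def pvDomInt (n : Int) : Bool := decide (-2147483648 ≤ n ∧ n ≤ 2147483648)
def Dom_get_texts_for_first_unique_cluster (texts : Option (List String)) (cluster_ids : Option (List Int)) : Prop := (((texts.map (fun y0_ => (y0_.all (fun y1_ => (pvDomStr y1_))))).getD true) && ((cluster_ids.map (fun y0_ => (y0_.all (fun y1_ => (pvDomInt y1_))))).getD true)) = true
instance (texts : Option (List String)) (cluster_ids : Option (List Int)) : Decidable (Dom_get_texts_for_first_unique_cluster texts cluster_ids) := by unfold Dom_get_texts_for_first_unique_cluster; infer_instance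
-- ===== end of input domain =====

-- B replaces A's membership-state pass (set + dict + appended list) by a stateless
-- take-and-filter (nub) loop; objective: alternative (same results, no membership state).


-- ===== PORT A =====
-- loop body of A (the three ifs, in A's order), kept as a named helper
def pvStepA (st : PySem.Dict Int String × PySem.Set Int × List String) (p : String × Int) :
    PySem.Dict Int String × PySem.Set Int × List String :=
  let (cluster_to_text, unique_cluster_ids, result_texts) := st
  let cluster_to_text :=
    if cluster_to_text.contains p.2 then cluster_to_text
    else cluster_to_text.insert p.2 p.1
  if unique_cluster_ids.contains p.2 then
    (cluster_to_text, unique_cluster_ids, result_texts)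
  else
    (cluster_to_text, PySem.Set.add unique_cluster_ids p.2, result_texts ++ [p.1])

def get_texts_for_first_unique_cluster (texts : Option (List String)) (cluster_ids : Option (List Int)) : List String :=
  let texts := texts.getD []
  let cluster_ids := cluster_ids.getD []
  ((texts.zip cluster_ids).foldl pvStepA (PySem.Dict.empty, PySem.Set.empty, [])).2.2

-- ===== PORT B =====
-- B's while loop: peel the head pair, emit its text, filter its cluster id out of the worklist
def pvNubLoop (pairs : List (String × Int)) (result : List String) : List String :=
  match pairs with
  | [] => result
  | (t, c) :: rest => pvNubLoop (rest.filter (fun p => p.2 != c)) (result ++ [t])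
termination_by pairs.length
decreasing_by
  rw [List.length_unattach]
  exact Nat.lt_succ_of_le (le_trans (List.length_filter_le _ _) (by rw [List.length_attach]))

def get_texts_for_first_unique_cluster_alt (texts : Option (List String)) (cluster_ids : Option (List Int)) : List String :=
  pvNubLoop ((texts.getD []).zip (cluster_ids.getD [])) []

-- ===== PRECONDITION & SPEC =====
def Spec_get_texts_for_first_unique_cluster (texts : Option (List String)) (cluster_ids : Option (List Int)) (out : List String) : Prop := out = get_texts_for_first_unique_cluster_alt texts cluster_ids
instance (texts : Option (List String)) (cluster_ids : Option (List Int)) (out : List String) : Decidable (Spec_get_texts_for_first_unique_cluster texts cluster_ids out) := by unfold Spec_get_texts_for_first_unique_cluster; infer_instance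

-- ===== CLAIM (what is proved, stated in full; the proofs are below) =====
def Claim_equal_get_texts_for_first_unique_cluster : Prop := ∀ (texts : Option (List String)) (cluster_ids : Option (List Int)), Dom_get_texts_for_first_unique_cluster texts cluster_ids → Spec_get_texts_for_first_unique_cluster texts cluster_ids (get_texts_for_first_unique_cluster texts cluster_ids)

-- ===== LEMMAS AND PROOFS =====

theorem pvStepA_eq (d : PySem.Dict Int String) (s : PySem.Set Int) (r : List String) (p : String × Int) :
    pvStepA (d, s, r) p =
      if s.contains p.2 then
        ((if d.contains p.2 then d else d.insert p.2 p.1), s, r)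
      else
        ((if d.contains p.2 then d else d.insert p.2 p.1), PySem.Set.add s p.2, r ++ [p.1]) := rfl

theorem pvNubLoop_nil (r : List String) : pvNubLoop [] r = r := by
  unfold pvNubLoop; rfl

theorem pvNubLoop_cons (t : String) (c : Int) (rest : List (String × Int)) (r : List String) :
    pvNubLoop ((t, c) :: rest) r = pvNubLoop (rest.filter (fun p => p.2 != c)) (r ++ [t]) := by
  conv_lhs => unfold pvNubLoop

theorem pv_contains_add (s : PySem.Set Int) (c k : Int) :
    (PySem.Set.add s c).contains k = (s.contains k || k == c) := by
  by_cases h : k = c <;> by_cases hm : k ∈ s <;> by_cases hcs : c ∈ s <;> simp_all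

-- Invariant: A's fold from state (d, s, r) returns r followed by the nub of the pairs whose
-- cluster id is not yet in s; B's nub loop computes exactly that for s = ∅.
theorem pv_loop_eq (pairs : List (String × Int)) (d : PySem.Dict Int String)
    (s : PySem.Set Int) (r : List String) :
    (pairs.foldl pvStepA (d, s, r)).2.2 =
      pvNubLoop (pairs.filter (fun p => !s.contains p.2)) r := by
  induction pairs generalizing d s r with
  | nil => simp only [List.foldl_nil, List.filter_nil, pvNubLoop_nil]
  | cons p rest ih =>
    obtain ⟨t, c⟩ := p
    simp only [List.foldl_cons, pvStepA_eq]
    by_cases hc : s.contains c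
    · rw [if_pos hc, List.filter_cons_of_neg (by simpa using hc), ih]
    · rw [if_neg hc, List.filter_cons_of_pos (by simpa using hc), pvNubLoop_cons,
        List.filter_filter, ih]
      congr 1
      apply List.filter_congr
      intro q _
      rw [pv_contains_add, Bool.not_or, Bool.and_comm]
      by_cases hq : q.2 = c <;> simp [hq, bne]

-- ===== VERDICT (by name: the statement is the Claim_ definition above) =====
theorem get_texts_for_first_unique_cluster_spec : Claim_equal_get_texts_for_first_unique_cluster := by
  intro texts cluster_ids _
  unfold Spec_get_texts_for_first_unique_cluster
  simp only [get_texts_for_first_unique_cluster, get_texts_for_first_unique_cluster_alt]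
  rw [pv_loop_eq]
  congr 1
  apply List.filter_eq_self.mpr
  intro q _
  simp [PySem.Set.empty]
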